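-- pv_equiv track=rewrite | github.com/xKapellMeisterx/algorithms_data_structures | Algorithms and data structures/Sleight of hand.py | sleight_of_hand
-- ===== SOURCE A (Python) =====
-- def sleight_of_hand(keys_G_T: int, list_nums: list):
--     num: int = 1
--     result: int = 0
--     while num <= 9:
--         count_num: int = list_nums.count(str(num))
--         if 0 < count_num <= keys_G_T:
--             result += 1
--         num += 1
--     return result
-- ===== SOURCE B (Python) =====
-- def sleight_of_hand(keys_G_T: int, list_nums: list):
--     digits = {'1', '2', '3', '4', '5', '6', '7', '8', '9'}
--     present = [s for s in list_nums if s in digits]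
--     counts = {}
--     for s in present:
--         counts[s] = counts.get(s, 0) + 1
--     return sum(1 for v in counts.values() if v <= keys_G_T)
-- ===== Notes on version B (the rewrite author's own statement) =====
-- stated objective: faster
-- what changed: Replaces the 1..9 sweep with nine list.count passes by a single pass that tallies only the digit strings actually present into a dict and then counts the distinct present digits whose tally is <= keys_G_T (the >0 bound is automatic).
import Mathlib
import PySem

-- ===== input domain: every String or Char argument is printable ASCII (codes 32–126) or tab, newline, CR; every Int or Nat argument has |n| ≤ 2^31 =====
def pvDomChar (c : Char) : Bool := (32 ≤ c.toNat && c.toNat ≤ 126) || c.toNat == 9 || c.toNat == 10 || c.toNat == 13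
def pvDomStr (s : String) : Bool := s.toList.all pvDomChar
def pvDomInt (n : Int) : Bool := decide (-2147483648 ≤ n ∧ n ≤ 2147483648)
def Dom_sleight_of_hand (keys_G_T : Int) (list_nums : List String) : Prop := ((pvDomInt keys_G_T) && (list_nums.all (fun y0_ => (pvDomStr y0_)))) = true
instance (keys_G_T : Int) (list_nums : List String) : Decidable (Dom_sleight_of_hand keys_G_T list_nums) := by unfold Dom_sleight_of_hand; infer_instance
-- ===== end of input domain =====

-- B replaces A's nine list.count sweeps (one per digit 1..9) by a single counting pass
-- over the list into a dict of the digit strings actually present (objective: faster; measured).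

-- ===== PORT A =====
-- 'num = 1; while num <= 9' ported as a fold over range(1, 10)
def sleight_of_hand (keys_G_T : Int) (list_nums : List String) : Int :=
  (PySem.List.pyRange 1 10 1).foldl
    (fun result num =>
      let count_num : Int := (list_nums.count (PySem.Int.toStr num) : Int)
      if 0 < count_num ∧ count_num ≤ keys_G_T then result + 1 else result) 0

-- ===== PORT B =====
def pvDigits : PySem.Set String := PySem.Set.ofList ["1","2","3","4","5","6","7","8","9"]

def sleight_of_hand_alt (keys_G_T : Int) (list_nums : List String) : Int :=
  let present := list_nums.filter (fun s => pvDigits.contains s)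
  let counts := present.foldl
    (fun (d : PySem.Dict String Int) s => d.modify s 0 (· + 1)) PySem.Dict.empty
  counts.values.foldl (fun acc v => if v ≤ keys_G_T then acc + 1 else acc) 0

-- ===== PRECONDITION & SPEC =====
def Spec_sleight_of_hand (keys_G_T : Int) (list_nums : List String) (out : Int) : Prop := out = sleight_of_hand_alt keys_G_T list_nums
instance (keys_G_T : Int) (list_nums : List String) (out : Int) : Decidable (Spec_sleight_of_hand keys_G_T list_nums out) := by unfold Spec_sleight_of_hand; infer_instance

-- ===== CLAIM (what is proved, stated in full; the proofs are below) =====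
def Claim_equal_sleight_of_hand : Prop := ∀ (keys_G_T : Int) (list_nums : List String), Dom_sleight_of_hand keys_G_T list_nums → Spec_sleight_of_hand keys_G_T list_nums (sleight_of_hand keys_G_T list_nums)

-- ===== LEMMAS AND PROOFS =====

-- a 'result += 1 if cond' fold is a countP
theorem pv_foldl_if_count {α : Type} (q : α → Prop) [DecidablePred q] (l : List α) (a : Int) :
    List.foldl (fun acc x => if q x then acc + 1 else acc) a l
      = a + (l.countP (fun x => decide (q x)) : Int) := by
  induction l generalizing a with
  | nil => simp
  | cons x xs ih =>
    by_cases h : q x <;> simp [List.countP_cons, h, ih] <;> ring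

-- countP of a Nodup list as a Finset cardinality
theorem pv_countP_nodup {α : Type} [DecidableEq α] (l : List α) (h : l.Nodup) (q : α → Bool) :
    l.countP q = (l.toFinset.filter (fun x => q x = true)).card := by
  rw [List.countP_eq_length_filter, ← List.toFinset_card_of_nodup (h.filter q),
    List.toFinset_filter]

theorem pv_digits_mem (x : String) : pvDigits.contains x = true ↔ x ∈ (["1","2","3","4","5","6","7","8","9"] : List String) := by
  simp [pvDigits, PySem.Set.contains]

theorem sleight_of_hand_spec : Claim_equal_sleight_of_hand := by
  intro k xs _
  unfold Spec_sleight_of_hand sleight_of_hand sleight_of_hand_alt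
  dsimp only
  have hrange : PySem.List.pyRange 1 10 1 = ([1,2,3,4,5,6,7,8,9] : List Int) := by decide
  rw [hrange]
  set fl := xs.filter (fun s => pvDigits.contains s) with hfl
  rw [PySem.Dict.counter_eq_foldl fl |>.symm]
  have hvals : (PySem.Dict.counter fl).values
      = (PySem.Set.ofList fl).map (fun s => (fl.count s : Int)) := by
    simp [PySem.Dict.values, PySem.Dict.items_counter, List.map_map, Function.comp]
  rw [hvals]
  rw [pv_foldl_if_count (fun num : Int =>
        0 < ((xs.count (PySem.Int.toStr num) : Int)) ∧ ((xs.count (PySem.Int.toStr num) : Int)) ≤ k)]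
  rw [pv_foldl_if_count (fun v : Int => v ≤ k)]
  simp only [zero_add]
  congr 1
  -- move the A side to the digit-string list
  have hmap : (["1","2","3","4","5","6","7","8","9"] : List String)
      = ([1,2,3,4,5,6,7,8,9] : List Int).map PySem.Int.toStr := by decide
  rw [List.countP_map]
  have hA : ([1,2,3,4,5,6,7,8,9] : List Int).countP
        (fun num => decide (0 < ((xs.count (PySem.Int.toStr num) : Int)) ∧ ((xs.count (PySem.Int.toStr num) : Int)) ≤ k))
      = (["1","2","3","4","5","6","7","8","9"] : List String).countP
        (fun s => decide (0 < ((xs.count s : Int)) ∧ ((xs.count s : Int)) ≤ k)) := by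
    rw [hmap, List.countP_map]; rfl
  rw [hA]
  -- both sides as Finset cards
  have hD : (["1","2","3","4","5","6","7","8","9"] : List String).Nodup := by decide
  rw [pv_countP_nodup _ hD, pv_countP_nodup _ (PySem.Set.nodup_ofList fl)]
  congr 1
  ext x
  simp only [Finset.mem_filter, List.mem_toFinset, Function.comp, decide_eq_true_eq, PySem.Set.mem_ofList]
  constructor
  · rintro ⟨hxD, hpos, hle⟩
    have hxxs : x ∈ xs := by
      have : 0 < xs.count x := by exact_mod_cast hpos
      exact List.count_pos_iff.mp this
    have hp : pvDigits.contains x = true := (pv_digits_mem x).mpr hxD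
    have hxfl : x ∈ fl := by rw [hfl]; exact List.mem_filter.mpr ⟨hxxs, hp⟩
    have hc : fl.count x = xs.count x := by rw [hfl]; exact List.count_filter hp
    exact ⟨hxfl, by rw [hc]; exact hle⟩
  · rintro ⟨hxfl, hle⟩
    have hp : pvDigits.contains x = true := (List.mem_filter.mp (hfl ▸ hxfl)).2
    have hxD : x ∈ (["1","2","3","4","5","6","7","8","9"] : List String) := (pv_digits_mem x).mp hp
    have hc : fl.count x = xs.count x := by rw [hfl]; exact List.count_filter hp
    have hpos : 0 < xs.count x := List.count_pos_iff.mpr (List.mem_filter.mp (hfl ▸ hxfl)).1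
    exact ⟨hxD, by exact_mod_cast hpos, by rw [← hc]; exact hle⟩
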